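-- pv_equiv track=rewrite | github.com/Sameer-Khan08/NLP-Assignment-2 | Transformer Encoder for Topic Classification/src/data_topic.py | encode_tokens
-- ===== SOURCE A (Python) =====
-- from typing import Dict, List, Tuple, Any
--
-- PAD_TOKEN = "<PAD>"
--
-- UNK_TOKEN = "<UNK>"
--
-- CLS_TOKEN = "<CLS>"
--
-- def encode_tokens(tokens: List[str], word2idx: Dict[str, int], max_len: int):
--     cls_id = word2idx[CLS_TOKEN]
--     unk_id = word2idx[UNK_TOKEN]
--     pad_id = word2idx[PAD_TOKEN]
--
--     ids = [cls_id] + [word2idx.get(tok, unk_id) for tok in tokens[:max_len - 1]]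
--     attn_mask = [1] * len(ids)
--
--     if len(ids) < max_len:
--         pad_len = max_len - len(ids)
--         ids += [pad_id] * pad_len
--         attn_mask += [0] * pad_len
--
--     return ids, attn_mask
-- ===== SOURCE B (Python) =====
-- from typing import Dict, List
--
-- PAD_TOKEN = "<PAD>"
-- UNK_TOKEN = "<UNK>"
-- CLS_TOKEN = "<CLS>"
--
-- def encode_tokens(tokens: List[str], word2idx: Dict[str, int], max_len: int):
--     # Build both sequences BACK-TO-FRONT: emit the padding first (counting the
--     # free slots down in a while loop), then the token ids in reverse order,
--     # then the CLS id, and reverse once at the end.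
--     cls_id = word2idx[CLS_TOKEN]
--     unk_id = word2idx[UNK_TOKEN]
--     pad_id = word2idx[PAD_TOKEN]
--
--     body = tokens[:max_len - 1]
--     rev_ids, rev_mask = [], []
--     slots = max_len - 1 - len(body)
--     while slots > 0:
--         rev_ids.append(pad_id)
--         rev_mask.append(0)
--         slots -= 1
--     for tok in reversed(body):
--         rev_ids.append(word2idx.get(tok, unk_id))
--         rev_mask.append(1)
--     rev_ids.append(cls_id)
--     rev_mask.append(1)
--     rev_ids.reverse()
--     rev_mask.reverse()
--     return rev_ids, rev_mask
-- ===== Notes on version B (the rewrite author's own statement) =====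
-- stated objective: alternative
-- what changed: B builds both output lists back-to-front (padding emitted first by a countdown while-loop, then the token ids in reverse, then CLS) and reverses once at the end, instead of A's forward build-content-then-append-padding with length arithmetic and list replication.
import Mathlib
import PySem

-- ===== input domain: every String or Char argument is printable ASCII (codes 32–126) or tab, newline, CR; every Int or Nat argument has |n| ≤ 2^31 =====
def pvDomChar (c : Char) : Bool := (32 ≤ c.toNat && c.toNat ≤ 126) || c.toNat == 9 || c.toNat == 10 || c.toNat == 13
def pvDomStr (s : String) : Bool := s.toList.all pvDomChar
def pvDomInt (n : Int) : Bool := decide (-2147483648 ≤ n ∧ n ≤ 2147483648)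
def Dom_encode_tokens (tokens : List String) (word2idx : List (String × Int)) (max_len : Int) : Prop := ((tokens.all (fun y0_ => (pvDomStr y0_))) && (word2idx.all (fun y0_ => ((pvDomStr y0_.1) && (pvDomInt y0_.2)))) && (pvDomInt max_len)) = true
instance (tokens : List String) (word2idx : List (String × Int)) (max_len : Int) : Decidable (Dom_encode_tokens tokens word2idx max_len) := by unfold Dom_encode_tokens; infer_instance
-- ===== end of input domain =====

-- B builds the output back-to-front (padding first, tokens reversed, CLS last, one final
-- reverse) instead of A's forward concatenate-then-pad; same value, same cost (alternative).


-- ===== PORT A =====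
def encode_tokens (tokens : List String) (word2idx : List (String × Int)) (max_len : Int) : List Int × List Int :=
  let d := PySem.Dict.ofList word2idx
  match d.get? "<CLS>", d.get? "<UNK>", d.get? "<PAD>" with
  | some cls_id, some unk_id, some pad_id =>
      let ids := cls_id :: (PySem.List.slice tokens none (some (max_len - 1))).map (fun tok => d.getD tok unk_id)
      let attn_mask := List.replicate ids.length (1 : Int)
      if (ids.length : Int) < max_len then
        let pad_len := (max_len - (ids.length : Int)).toNat
        (ids ++ List.replicate pad_len pad_id, attn_mask ++ List.replicate pad_len 0)
      else (ids, attn_mask)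
  | _, _, _ => ([], [])  -- KeyError in Python: excluded by Pre_

-- ===== PORT B =====
-- Source B's 'while slots > 0' padding loop, appending to the reversed buffers
def pvWhilePad (pad_id : Int) (slots : Int) (rev_ids rev_mask : List Int) : List Int × List Int :=
  if slots > 0 then pvWhilePad pad_id (slots - 1) (rev_ids ++ [pad_id]) (rev_mask ++ [0])
  else (rev_ids, rev_mask)
termination_by slots.toNat
decreasing_by omega

def encode_tokens_alt (tokens : List String) (word2idx : List (String × Int)) (max_len : Int) : List Int × List Int :=
  let d := PySem.Dict.ofList word2idx
  match d.get? "<CLS>" with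
  | none => ([], [])  -- KeyError in Python: excluded by Pre_
  | some cls_id =>
  match d.get? "<UNK>" with
  | none => ([], [])
  | some unk_id =>
  match d.get? "<PAD>" with
  | none => ([], [])
  | some pad_id =>
      let body := PySem.List.slice tokens none (some (max_len - 1))
      let p := pvWhilePad pad_id (max_len - 1 - (body.length : Int)) [] []
      let p := body.reverse.foldl
        (fun (p : List Int × List Int) tok => (p.1 ++ [d.getD tok unk_id], p.2 ++ [1])) p
      ((p.1 ++ [cls_id]).reverse, (p.2 ++ [1]).reverse)

-- ===== PRECONDITION & SPEC =====
-- A raises KeyError unless "<CLS>", "<UNK>" and "<PAD>" are all keys of word2idx.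
def Pre_encode_tokens (tokens : List String) (word2idx : List (String × Int)) (max_len : Int) : Prop :=
  "<CLS>" ∈ word2idx.map Prod.fst ∧ "<UNK>" ∈ word2idx.map Prod.fst ∧ "<PAD>" ∈ word2idx.map Prod.fst
instance (tokens : List String) (word2idx : List (String × Int)) (max_len : Int) : Decidable (Pre_encode_tokens tokens word2idx max_len) := by unfold Pre_encode_tokens; infer_instance

def pvWitness_encode_tokens : List String × (List (String × Int)) × Int :=
  (["hi", "zz"], [("<PAD>", 0), ("<UNK>", 1), ("<CLS>", 2), ("hi", 5)], 5)

def Spec_encode_tokens (tokens : List String) (word2idx : List (String × Int)) (max_len : Int) (out : List Int × List Int) : Prop := out = encode_tokens_alt tokens word2idx max_len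
instance (tokens : List String) (word2idx : List (String × Int)) (max_len : Int) (out : List Int × List Int) : Decidable (Spec_encode_tokens tokens word2idx max_len out) := by unfold Spec_encode_tokens; infer_instance

-- ===== CLAIM (what is proved, stated in full; the proofs are below) =====
def Claim_equal_encode_tokens : Prop := ∀ (tokens : List String) (word2idx : List (String × Int)) (max_len : Int), Dom_encode_tokens tokens word2idx max_len → Pre_encode_tokens tokens word2idx max_len → Spec_encode_tokens tokens word2idx max_len (encode_tokens tokens word2idx max_len)

-- ===== LEMMAS AND PROOFS =====

lemma pv_get?_isSome_of_mem_fst (l : List (String × Int)) (k : String)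
    (h : k ∈ l.map Prod.fst) : ((PySem.Dict.ofList l).get? k).isSome := by
  rw [← PySem.Dict.contains_eq_isSome_get?, PySem.Dict.contains_iff_mem_keys]
  show k ∈ (l.foldl (fun d p => d.insert p.1 p.2) PySem.Dict.empty).keys
  rw [PySem.Dict.keys_foldl_insert_key l Prod.fst (fun d p => p.2) PySem.Dict.empty]
  simp only [PySem.Dict.keys_empty, PySem.Set.mem_update, List.not_mem_nil, List.mem_map,
    Prod.exists, exists_and_right, exists_eq_right, false_or]
  obtain ⟨⟨a, b⟩, hm, rfl⟩ := List.mem_map.1 h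
  exact ⟨b, hm⟩

lemma pvWhilePad_spec (pad_id : Int) : ∀ (n : Nat) (slots : Int), slots.toNat = n →
    ∀ (ri rm : List Int),
      pvWhilePad pad_id slots ri rm =
        (ri ++ List.replicate slots.toNat pad_id, rm ++ List.replicate slots.toNat 0) := by
  intro n
  induction n with
  | zero =>
    intro s hs ri rm
    rw [pvWhilePad, if_neg (by omega)]
    simp [hs]
  | succ n ih =>
    intro s hs ri rm
    rw [pvWhilePad, if_pos (by omega), ih (s - 1) (by omega)]
    have h : s.toNat = (s - 1).toNat + 1 := by omega
    rw [h]
    simp [List.replicate_succ, List.append_assoc]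

lemma pv_fold_append (d : PySem.Dict String Int) (unk : Int) :
    ∀ (ts : List String) (ri rm : List Int),
      ts.foldl (fun (p : List Int × List Int) tok => (p.1 ++ [d.getD tok unk], p.2 ++ [1])) (ri, rm)
        = (ri ++ ts.map (fun t => d.getD t unk), rm ++ List.replicate ts.length 1) := by
  intro ts
  induction ts with
  | nil => simp
  | cons t ts ih =>
    intro ri rm
    simp only [List.foldl_cons, ih]
    simp [List.replicate_succ, List.append_assoc]

-- ===== VERDICT (by name: the statement is the Claim_ definition above) =====
theorem encode_tokens_spec : Claim_equal_encode_tokens := by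
  intro tokens word2idx max_len _ hpre
  obtain ⟨hc, hu, hp⟩ := hpre
  unfold Spec_encode_tokens encode_tokens encode_tokens_alt
  obtain ⟨cls, hcls⟩ := Option.isSome_iff_exists.1 (pv_get?_isSome_of_mem_fst word2idx _ hc)
  obtain ⟨unk, hunk⟩ := Option.isSome_iff_exists.1 (pv_get?_isSome_of_mem_fst word2idx _ hu)
  obtain ⟨pad, hpad⟩ := Option.isSome_iff_exists.1 (pv_get?_isSome_of_mem_fst word2idx _ hp)
  simp only [hcls, hunk, hpad]
  set d := PySem.Dict.ofList word2idx with hd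
  set body := PySem.List.slice tokens none (some (max_len - 1)) with hbody
  set g : String → Int := fun tok => d.getD tok unk with hg
  set m : Nat := body.length with hm
  -- B's side: padding (reversed), reversed token ids, CLS, then one reverse
  rw [pvWhilePad_spec pad _ _ rfl, pv_fold_append]
  simp only [List.nil_append, List.map_reverse, List.length_reverse]
  -- A's side
  split
  · rename_i hlt
    simp only [List.length_cons, List.length_map] at hlt ⊢
    simp [List.reverse_append, List.replicate_succ, hg]
    omega
  · rename_i hge
    simp only [List.length_cons, List.length_map] at hge
    have h0 : (max_len - 1 - (m : Int)).toNat = 0 := by omega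
    simp [h0, List.reverse_append, List.replicate_succ, hg]
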